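-- pv_equiv track=rewrite | github.com/AleksandrSosnin/Python_2025 | Semminar_6/Task_2_chess.py | are_queens_safe
-- ===== SOURCE A (Python) =====
-- def are_queens_safe(positions):
--     """
--     Проверяет, находятся ли 8 ферзей в безопасной позиции.
--
--     :param positions: Список из 8 пар координат (x, y), где 1 <= x, y <= 8.
--     :return: True, если ферзи не атакуют друг друга, иначе False.
--     """
--     rows = set()  # Хранит строки, занятые ферзями
--     cols = set()  # Хранит столбцы, занятые ферзями
--     diag1 = set()  # Хранит главные диагонали (x - y)
--     diag2 = set()  # Хранит побочные диагонали (x + y)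
--
--     for x, y in positions:
--         # Если ферзь занимает ту же строку, столбец или диагональ
--         if x in rows or y in cols or (x - y) in diag1 or (x + y) in diag2:
--             return False
--
--         # Добавляем координаты ферзя в соответствующие множества
--         rows.add(x)
--         cols.add(y)
--         diag1.add(x - y)
--         diag2.add(x + y)
--
--     return True
-- ===== SOURCE B (Python) =====
-- def are_queens_safe(positions):
--     n = len(positions)
--     for i in range(n):
--         x1, y1 = positions[i]
--         for j in range(i + 1, n):
--             x2, y2 = positions[j]
--             if x1 == x2 or y1 == y2 or abs(x1 - x2) == abs(y1 - y2):
--                 return False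
--     return True
-- ===== Notes on version B (the rewrite author's own statement) =====
-- stated objective: alternative
-- what changed: Replaced the single pass maintaining four occupancy sets (rows, cols, two diagonals) by a direct pairwise double loop comparing every unordered pair of queens with abs(x1-x2)==abs(y1-y2) for diagonals.
import Mathlib
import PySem

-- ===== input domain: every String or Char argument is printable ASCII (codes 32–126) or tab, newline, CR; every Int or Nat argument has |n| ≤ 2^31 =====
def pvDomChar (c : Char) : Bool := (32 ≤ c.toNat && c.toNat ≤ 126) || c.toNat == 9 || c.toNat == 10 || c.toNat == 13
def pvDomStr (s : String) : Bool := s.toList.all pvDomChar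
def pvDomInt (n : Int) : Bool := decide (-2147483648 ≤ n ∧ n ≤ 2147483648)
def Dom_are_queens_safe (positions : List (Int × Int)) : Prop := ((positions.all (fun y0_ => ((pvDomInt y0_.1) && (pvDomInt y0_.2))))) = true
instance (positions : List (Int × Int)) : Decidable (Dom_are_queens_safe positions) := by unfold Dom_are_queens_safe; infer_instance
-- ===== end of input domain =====

-- B replaces A's single pass over four occupancy sets by a direct O(n^2) pairwise scan (alternative decomposition, not faster).


-- ===== PORT A =====
-- the for-loop of A, carrying the four sets (rows, cols, diag1, diag2)
def aqsLoop : PySem.Set Int → PySem.Set Int → PySem.Set Int → PySem.Set Int → List (Int × Int) → Bool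
  | _, _, _, _, [] => true
  | rows, cols, diag1, diag2, (x, y) :: rest =>
    if rows.contains x || cols.contains y || diag1.contains (x - y) || diag2.contains (x + y) then
      false
    else
      aqsLoop (rows.add x) (cols.add y) (diag1.add (x - y)) (diag2.add (x + y)) rest

def are_queens_safe (positions : List (Int × Int)) : Bool :=
  aqsLoop PySem.Set.empty PySem.Set.empty PySem.Set.empty PySem.Set.empty positions

-- ===== PORT B =====
-- the inner-loop test of B: x1 == x2 or y1 == y2 or abs(x1-x2) == abs(y1-y2)
def aqsAttack (p q : Int × Int) : Bool :=
  p.1 == q.1 || p.2 == q.2 || (p.1 - q.1).natAbs == (p.2 - q.2).natAbs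

-- B's outer loop: positions[i] against positions[i+1:], then the next i
def aqsPairs : List (Int × Int) → Bool
  | [] => true
  | p :: rest => if rest.any (fun q => aqsAttack p q) then false else aqsPairs rest

def are_queens_safe_alt (positions : List (Int × Int)) : Bool :=
  aqsPairs positions

-- ===== PRECONDITION & SPEC =====
def Spec_are_queens_safe (positions : List (Int × Int)) (out : Bool) : Prop := out = are_queens_safe_alt positions
instance (positions : List (Int × Int)) (out : Bool) : Decidable (Spec_are_queens_safe positions out) := by unfold Spec_are_queens_safe; infer_instance

-- ===== CLAIM (what is proved, stated in full; the proofs are below) =====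
def Claim_equal_are_queens_safe : Prop := ∀ (positions : List (Int × Int)), Dom_are_queens_safe positions → Spec_are_queens_safe positions (are_queens_safe positions)

-- ===== LEMMAS AND PROOFS =====

-- "p attacks q" as a proposition
def aqsAtt (p q : Int × Int) : Prop :=
  p.1 = q.1 ∨ p.2 = q.2 ∨ p.1 - p.2 = q.1 - q.2 ∨ p.1 + p.2 = q.1 + q.2

theorem aqsAttack_iff (p q : Int × Int) : aqsAttack p q = true ↔ aqsAtt p q := by
  simp only [aqsAttack, aqsAtt, Bool.or_eq_true, beq_iff_eq]
  omega

theorem aqsAtt_comm (p q : Int × Int) : aqsAtt p q ↔ aqsAtt q p := by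
  unfold aqsAtt; omega

theorem aqsPairs_iff (ps : List (Int × Int)) :
    aqsPairs ps = true ↔ ps.Pairwise (fun p q => ¬ aqsAtt p q) := by
  induction ps with
  | nil => simp [aqsPairs]
  | cons p rest ih =>
    simp only [aqsPairs, List.pairwise_cons, ← ih]
    by_cases h : rest.any (fun q => aqsAttack p q) = true
    · simp only [h, if_true]
      simp only [List.any_eq_true, aqsAttack_iff] at h
      obtain ⟨q, hq, hatt⟩ := h
      constructor
      · intro hfalse; cases hfalse
      · rintro ⟨hall, -⟩; exact absurd hatt (hall q hq)
    · simp only [h]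
      simp only [List.any_eq_true, aqsAttack_iff, not_exists, not_and] at h
      constructor
      · intro hrest; exact ⟨fun q hq => h q hq, hrest⟩
      · rintro ⟨-, hrest⟩; exact hrest

theorem aqsLoop_iff (ps : List (Int × Int)) : ∀ (seen : List (Int × Int)),
    aqsLoop (PySem.Set.ofList (seen.map Prod.fst)) (PySem.Set.ofList (seen.map Prod.snd))
        (PySem.Set.ofList (seen.map (fun p => p.1 - p.2)))
        (PySem.Set.ofList (seen.map (fun p => p.1 + p.2))) ps = true
      ↔ (∀ q ∈ seen, ∀ p ∈ ps, ¬ aqsAtt p q) ∧ ps.Pairwise (fun p q => ¬ aqsAtt p q) := by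
  induction ps with
  | nil => intro seen; simp [aqsLoop]
  | cons hd rest ih =>
    intro seen
    obtain ⟨x, y⟩ := hd
    simp only [aqsLoop]
    by_cases hc : ∃ q ∈ seen, aqsAtt (x, y) q
    · obtain ⟨q, hqmem, hatt⟩ := hc
      have hcond : (PySem.Set.contains (PySem.Set.ofList (seen.map Prod.fst)) x
          || PySem.Set.contains (PySem.Set.ofList (seen.map Prod.snd)) y
          || PySem.Set.contains (PySem.Set.ofList (seen.map (fun p => p.1 - p.2))) (x - y)
          || PySem.Set.contains (PySem.Set.ofList (seen.map (fun p => p.1 + p.2))) (x + y)) = true := by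
        simp only [Bool.or_eq_true, PySem.Set.contains_iff, PySem.Set.mem_ofList, List.mem_map,
          or_assoc]
        rcases hatt with h | h | h | h
        · exact Or.inl ⟨q, hqmem, h.symm⟩
        · exact Or.inr (Or.inl ⟨q, hqmem, h.symm⟩)
        · exact Or.inr (Or.inr (Or.inl ⟨q, hqmem, h.symm⟩))
        · exact Or.inr (Or.inr (Or.inr ⟨q, hqmem, h.symm⟩))
      rw [hcond]
      simp only [if_true]
      constructor
      · intro hfalse; cases hfalse
      · rintro ⟨hall, -⟩
        exact absurd hatt (hall q hqmem (x, y) (List.mem_cons_self))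
    · have hcond : (PySem.Set.contains (PySem.Set.ofList (seen.map Prod.fst)) x
          || PySem.Set.contains (PySem.Set.ofList (seen.map Prod.snd)) y
          || PySem.Set.contains (PySem.Set.ofList (seen.map (fun p => p.1 - p.2))) (x - y)
          || PySem.Set.contains (PySem.Set.ofList (seen.map (fun p => p.1 + p.2))) (x + y)) = false := by
        rw [Bool.eq_false_iff]
        intro habs
        apply hc
        simp only [Bool.or_eq_true, PySem.Set.contains_iff, PySem.Set.mem_ofList,
          List.mem_map, or_assoc] at habs
        rcases habs with ⟨q, hq, h⟩ | ⟨q, hq, h⟩ | ⟨q, hq, h⟩ | ⟨q, hq, h⟩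
        · exact ⟨q, hq, Or.inl h.symm⟩
        · exact ⟨q, hq, Or.inr (Or.inl h.symm)⟩
        · exact ⟨q, hq, Or.inr (Or.inr (Or.inl h.symm))⟩
        · exact ⟨q, hq, Or.inr (Or.inr (Or.inr h.symm))⟩
      rw [hcond]
      rw [if_neg (by simp)]
      have hstep :
          aqsLoop (PySem.Set.add (PySem.Set.ofList (seen.map Prod.fst)) x)
              (PySem.Set.add (PySem.Set.ofList (seen.map Prod.snd)) y)
              (PySem.Set.add (PySem.Set.ofList (seen.map (fun p => p.1 - p.2))) (x - y))
              (PySem.Set.add (PySem.Set.ofList (seen.map (fun p => p.1 + p.2))) (x + y)) rest = true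
            ↔ (∀ q ∈ seen ++ [(x, y)], ∀ p ∈ rest, ¬ aqsAtt p q)
              ∧ rest.Pairwise (fun p q => ¬ aqsAtt p q) := by
        have := ih (seen ++ [(x, y)])
        simpa [List.map_append, PySem.Set.ofList_append_singleton] using this
      rw [hstep]
      constructor
      · rintro ⟨hall, hpw⟩
        refine ⟨?_, ?_⟩
        · intro q hq p hp
          rcases List.mem_cons.mp hp with rfl | hp
          · exact fun h => hc ⟨q, hq, h⟩
          · exact hall q (List.mem_append_left _ hq) p hp
        · refine List.pairwise_cons.mpr ⟨?_, hpw⟩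
          intro p hp h
          exact hall (x, y) (List.mem_append_right _ (List.mem_singleton.mpr rfl)) p hp
            ((aqsAtt_comm _ _).mpr h)
      · rintro ⟨hall, hpw⟩
        have hhd := List.pairwise_cons.mp hpw
        refine ⟨?_, hhd.2⟩
        intro q hq p hp
        rcases List.mem_append.mp hq with hq | hq
        · exact hall q hq p (List.mem_cons_of_mem _ hp)
        · rw [List.mem_singleton.mp hq]
          exact fun h => hhd.1 p hp ((aqsAtt_comm _ _).mp h)

-- ===== VERDICT (by name: the statement is the Claim_ definition above) =====
theorem are_queens_safe_spec : Claim_equal_are_queens_safe := by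
  intro positions _
  unfold Spec_are_queens_safe are_queens_safe are_queens_safe_alt
  rw [Bool.eq_iff_iff]
  have hA := aqsLoop_iff positions []
  simpa [PySem.Set.empty, aqsPairs_iff] using hA
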